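-- pv_equiv track=rewrite | github.com/chandankumarm55/DSA-Pratice-MCA | twoStacks.py | twoStacks
-- ===== SOURCE A (Python) =====
-- def twoStacks(maxSum, a, b):
--     sum = 0
--     count = 0
--     max_count = 0
--
--     # First, remove from b as much as possible
--     j = 0
--     while j < len(b) and sum + b[j] <= maxSum:
--         sum += b[j]
--         j += 1
--     max_count = j
--
--     # Now try to include from a, and adjust b if necessary
--     i = 0
--     while i < len(a):
--         sum += a[i]
--         i += 1
--         while sum > maxSum and j > 0:
--             j -= 1
--             sum -= b[j]
--         if sum <= maxSum:
--             max_count = max(max_count, i + j)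
--         else:
--             break
--
--     return max_count
-- ===== SOURCE B (Python) =====
-- def twoStacks(maxSum, a, b):
--     # Prefix-sum table for b, then a monotone stack of strict-minimum positions
--     # of that table; each step pops the stack instead of re-scanning b's elements.
--     prefB = [0]
--     for x in b:
--         prefB.append(prefB[-1] + x)
--
--     # j0 = index just before the first prefix sum of b that exceeds maxSum.
--     j0 = len(b)
--     for k in range(1, len(b) + 1):
--         if prefB[k] > maxSum:
--             j0 = k - 1
--             break
--
--     # stack of positions k <= j0 whose prefix sum is strictly below every
--     # later prefix sum up to j0 (top = largest position, values ascend with position)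
--     stack = []
--     for k in range(j0 + 1):
--         while stack and prefB[stack[-1]] >= prefB[k]:
--             stack.pop()
--         stack.append(k)
--
--     best = j0
--     s = 0
--     for i in range(len(a)):
--         s += a[i]
--         while stack and prefB[stack[-1]] > maxSum - s:
--             stack.pop()
--         if not stack:
--             break
--         best = max(best, i + 1 + stack[-1])
--     return best
-- ===== Notes on version B (the rewrite author's own statement) =====
-- stated objective: alternative
-- what changed: B builds a prefix-sum table of b and a monotone stack of its strict-minimum positions, then answers each step of the a-sweep by popping that stack, instead of A's running sum that pushes and pops individual elements of b.
import Mathlib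
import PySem

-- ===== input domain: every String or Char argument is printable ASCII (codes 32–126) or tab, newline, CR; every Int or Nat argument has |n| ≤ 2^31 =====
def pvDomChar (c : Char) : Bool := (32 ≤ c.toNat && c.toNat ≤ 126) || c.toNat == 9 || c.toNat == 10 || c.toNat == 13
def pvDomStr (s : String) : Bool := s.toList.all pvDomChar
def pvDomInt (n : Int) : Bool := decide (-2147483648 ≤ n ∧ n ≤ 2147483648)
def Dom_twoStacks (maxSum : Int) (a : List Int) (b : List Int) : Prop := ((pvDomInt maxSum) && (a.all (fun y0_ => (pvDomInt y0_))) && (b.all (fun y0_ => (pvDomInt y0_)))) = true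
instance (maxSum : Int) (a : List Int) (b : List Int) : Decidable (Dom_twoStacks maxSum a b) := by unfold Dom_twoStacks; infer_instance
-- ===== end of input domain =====

-- B replaces A's running-sum element push/pop sweep with a prefix-sum table of b plus a
-- monotone stack of its strict-minimum positions, popped during the a-sweep (alternative, same cost).

-- ===== PORT A =====
-- phase 1: while j < len(b) and sum + b[j] <= maxSum  (b[j] in range is checked, so getD is exact)
def twoStacksTake (maxSum : Int) (b : List Int) (sum : Int) (j : Nat) : Int × Nat :=
  if j < b.length ∧ sum + b.getD j 0 ≤ maxSum then
    twoStacksTake maxSum b (sum + b.getD j 0) (j + 1)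
  else (sum, j)
termination_by b.length - j
decreasing_by omega

-- inner while: while sum > maxSum and j > 0: j -= 1; sum -= b[j]
def twoStacksPop (maxSum : Int) (b : List Int) (sum : Int) (j : Nat) : Int × Nat :=
  if sum > maxSum ∧ 0 < j then
    twoStacksPop maxSum b (sum - b.getD (j - 1) 0) (j - 1)
  else (sum, j)
termination_by j
decreasing_by omega

-- outer while over i  (a[i] in range is checked, so getD is exact)
def twoStacksLoop (maxSum : Int) (a : List Int) (b : List Int) (sum : Int) (i j : Nat) (maxCount : Int) : Int :=
  if i < a.length then
    let sum1 := sum + a.getD i 0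
    let p := twoStacksPop maxSum b sum1 j
    if p.1 ≤ maxSum then
      twoStacksLoop maxSum a b p.1 (i + 1) p.2 (max maxCount ((i : Int) + 1 + (p.2 : Int)))
    else maxCount
  else maxCount
termination_by a.length - i
decreasing_by omega

def twoStacks (maxSum : Int) (a : List Int) (b : List Int) : Int :=
  let s := twoStacksTake maxSum b 0 0
  twoStacksLoop maxSum a b s.1 0 s.2 (s.2 : Int)

-- ===== PORT B =====
-- prefix-sum table: [0] then acc.append(acc[-1] + x)  (acc never empty, so getLast?.getD 0 is exact)
def altPref (l : List Int) : List Int :=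
  l.foldl (fun acc x => acc ++ [(acc.getLast?.getD 0) + x]) [0]

-- for k in range(1, len(b)+1): if prefB[k] > maxSum: j0 = k-1; break  (else j0 = len(b))
def altJ0 (maxSum : Int) (prefB : List Int) (k lenB : Nat) : Nat :=
  if k ≤ lenB then
    (if prefB.getD k 0 > maxSum then k - 1 else altJ0 maxSum prefB (k + 1) lenB)
  else lenB
termination_by lenB + 1 - k
decreasing_by omega

-- inner while of the stack build: while stack and prefB[stack[-1]] >= prefB[k]: stack.pop()
-- (stack held top-first)
def altPopGE (v : Int) (prefB : List Int) : List Nat → List Nat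
  | [] => []
  | t :: rest => if prefB.getD t 0 ≥ v then altPopGE v prefB rest else t :: rest

-- for k in range(j0+1): pop then push k
def altBuild (prefB : List Int) (j0 : Nat) : List Nat :=
  (List.range (j0 + 1)).foldl (fun st k => k :: altPopGE (prefB.getD k 0) prefB st) []

-- main while: while stack and prefB[stack[-1]] > maxSum - s: stack.pop()
def altPopGT (t : Int) (prefB : List Int) : List Nat → List Nat
  | [] => []
  | k :: rest => if prefB.getD k 0 > t then altPopGT t prefB rest else k :: rest

-- for i in range(len(a)): s += a[i]; pop; if not stack: break; best = max(best, i+1+stack[-1])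
def altMain (maxSum : Int) (a : List Int) (prefB : List Int) (st : List Nat) (s : Int) (i : Nat) (best : Int) : Int :=
  if i < a.length then
    let s1 := s + a.getD i 0
    match altPopGT (maxSum - s1) prefB st with
    | [] => best
    | k :: rest => altMain maxSum a prefB (k :: rest) s1 (i + 1) (max best ((i : Int) + 1 + (k : Int)))
  else best
termination_by a.length - i
decreasing_by omega

def twoStacks_alt (maxSum : Int) (a : List Int) (b : List Int) : Int :=
  let prefB := altPref b
  let j0 := altJ0 maxSum prefB 1 b.length
  let st := altBuild prefB j0
  altMain maxSum a prefB st 0 0 (j0 : Int)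

-- ===== PRECONDITION & SPEC =====
def Spec_twoStacks (maxSum : Int) (a : List Int) (b : List Int) (out : Int) : Prop := out = twoStacks_alt maxSum a b
instance (maxSum : Int) (a : List Int) (b : List Int) (out : Int) : Decidable (Spec_twoStacks maxSum a b out) := by unfold Spec_twoStacks; infer_instance

-- ===== CLAIM (what is proved, stated in full; the proofs are below) =====
def Claim_equal_twoStacks : Prop := ∀ (maxSum : Int) (a : List Int) (b : List Int), Dom_twoStacks maxSum a b → Spec_twoStacks maxSum a b (twoStacks maxSum a b)

-- ===== LEMMAS AND PROOFS =====

-- prefix sums starting from s (proof-only)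
def prefAux (s : Int) : List Int → List Int
  | [] => []
  | x :: xs => (s + x) :: prefAux (s + x) xs

theorem altPref_foldl (l : List Int) : ∀ (acc : List Int) (s : Int),
    acc.getLast?.getD 0 = s →
    l.foldl (fun acc x => acc ++ [(acc.getLast?.getD 0) + x]) acc = acc ++ prefAux s l := by
  induction l with
  | nil => intro acc s _; simp [prefAux]
  | cons x xs ih =>
    intro acc s hs
    simp only [List.foldl_cons, prefAux, hs]
    rw [ih (acc ++ [s + x]) (s + x) (by simp)]
    simp

theorem altPref_eq (l : List Int) : altPref l = 0 :: prefAux 0 l := by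
  unfold altPref
  rw [altPref_foldl l [0] 0 (by simp)]
  simp

theorem prefAux_getD (l : List Int) : ∀ (s : Int) (k : Nat), k ≤ l.length →
    (s :: prefAux s l).getD k 0 = s + (l.take k).sum := by
  induction l with
  | nil =>
    intro s k hk
    have : k = 0 := Nat.le_zero.mp hk
    subst this; simp
  | cons x xs ih =>
    intro s k hk
    cases k with
    | zero => simp
    | succ k =>
      have h := ih (s + x) k (by simpa using hk)
      simp only [prefAux, List.getD] at *
      simpa [List.take_succ_cons, add_assoc] using h

theorem altPref_getD (l : List Int) (k : Nat) (hk : k ≤ l.length) :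
    (altPref l).getD k 0 = (l.take k).sum := by
  rw [altPref_eq, prefAux_getD l 0 k hk, zero_add]

theorem take_succ_sum (l : List Int) (j : Nat) (hj : j < l.length) :
    (l.take (j + 1)).sum = (l.take j).sum + l.getD j 0 := by
  rw [List.take_add_one, List.sum_append]
  simp [List.getD, List.getElem?_eq_getElem hj]

-- ---- phase 1: A's take loop equals B's first-violation scan ----

theorem altJ0_le (maxSum : Int) (prefB : List Int) :
    ∀ (n k lenB : Nat), k ≥ 1 → lenB + 1 - k ≤ n → k - 1 ≤ lenB →
      k - 1 ≤ altJ0 maxSum prefB k lenB ∧ altJ0 maxSum prefB k lenB ≤ lenB := by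
  intro n
  induction n with
  | zero =>
    intro k lenB hk hn hkl
    rw [altJ0, if_neg (by omega)]
    omega
  | succ n ih =>
    intro k lenB hk hn hkl
    rw [altJ0]
    by_cases h1 : k ≤ lenB
    · rw [if_pos h1]
      by_cases h2 : prefB.getD k 0 > maxSum
      · rw [if_pos h2]; omega
      · rw [if_neg h2]
        have := ih (k + 1) lenB (by omega) (by omega) (by omega)
        omega
    · rw [if_neg h1]; omega

theorem take_eq_J0 (maxSum : Int) (b : List Int) :
    ∀ (n j : Nat), j ≤ b.length → b.length - j ≤ n →
      twoStacksTake maxSum b ((b.take j).sum) j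
        = ((b.take (altJ0 maxSum (altPref b) (j + 1) b.length)).sum,
           altJ0 maxSum (altPref b) (j + 1) b.length) := by
  intro n
  induction n with
  | zero =>
    intro j hj hn
    have hje : j = b.length := by omega
    rw [twoStacksTake, altJ0, if_neg (by omega), if_neg (by omega), hje]
  | succ n ih =>
    intro j hj hn
    rw [twoStacksTake, altJ0]
    by_cases h1 : j < b.length
    · have hpref : (altPref b).getD (j + 1) 0 = (b.take j).sum + b.getD j 0 := by
        rw [altPref_getD b (j + 1) (by omega), take_succ_sum b j h1]
      by_cases h2 : (b.take j).sum + b.getD j 0 ≤ maxSum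
      · rw [if_pos ⟨h1, h2⟩, if_pos (by omega),
            if_neg (by rw [hpref]; omega), ← take_succ_sum b j h1]
        exact ih (j + 1) (by omega) (by omega)
      · rw [if_neg (by tauto), if_pos (by omega), if_pos (by rw [hpref]; omega)]
        simp
    · rw [if_neg (by tauto), if_neg (by omega)]
      have : j = b.length := by omega
      rw [this]

-- ---- strict-minimum positions of a function p on [0, k] ----

def MinPos (p : Nat → Int) (j0 m : Nat) : Prop :=
  m ≤ j0 ∧ ∀ m', m < m' → m' ≤ j0 → p m < p m'

-- reference list of strict-minimum positions, top (largest) first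
def minsList (p : Nat → Int) : Nat → List Nat
  | 0 => [0]
  | k + 1 => (k + 1) :: (minsList p k).filter (fun m => p m < p (k + 1))

theorem minsList_mem (p : Nat → Int) : ∀ (k m : Nat), m ∈ minsList p k ↔ MinPos p k m := by
  intro k
  induction k with
  | zero =>
    intro m
    constructor
    · intro h
      simp only [minsList, List.mem_singleton] at h
      subst h
      exact ⟨le_refl 0, fun m' h1 h2 => by omega⟩
    · intro ⟨h1, _⟩
      simp only [minsList, List.mem_singleton]
      omega
  | succ k ih =>
    intro m
    simp only [minsList, List.mem_cons, List.mem_filter, decide_eq_true_eq]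
    constructor
    · rintro (rfl | ⟨hm, hlt⟩)
      · exact ⟨le_refl _, by omega⟩
      · obtain ⟨h1, h2⟩ := (ih m).mp hm
        refine ⟨by omega, fun m' hm' hm'' => ?_⟩
        by_cases hc : m' ≤ k
        · exact h2 m' hm' hc
        · have : m' = k + 1 := by omega
          subst this; exact hlt
    · rintro ⟨h1, h2⟩
      by_cases hc : m = k + 1
      · exact Or.inl hc
      · refine Or.inr ⟨(ih m).mpr ⟨by omega, fun m' hm' hm'' => h2 m' hm' (by omega)⟩, ?_⟩
        exact h2 (k + 1) (by omega) (le_refl _)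

theorem minsList_pairwise (p : Nat → Int) (k : Nat) :
    (minsList p k).Pairwise (fun x y => y < x ∧ p y < p x) := by
  induction k with
  | zero => simp [minsList]
  | succ k ih =>
    simp only [minsList]
    refine List.Pairwise.cons ?_ (List.Pairwise.filter _ ih)
    intro m hm
    rw [List.mem_filter, decide_eq_true_eq] at hm
    obtain ⟨hmem, hlt⟩ := hm
    have := ((minsList_mem p k m).mp hmem).1
    exact ⟨by omega, hlt⟩

-- popGE on a value-strictly-descending list is a filter
theorem altPopGE_filter (v : Int) (prefB : List Int) :
    ∀ (l : List Nat), l.Pairwise (fun x y => prefB.getD y 0 < prefB.getD x 0) →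
      altPopGE v prefB l = l.filter (fun m => prefB.getD m 0 < v) := by
  intro l
  induction l with
  | nil => intro _; simp [altPopGE]
  | cons h t ih =>
    intro hp
    rw [List.pairwise_cons] at hp
    obtain ⟨hh, ht⟩ := hp
    simp only [altPopGE, List.filter_cons]
    by_cases hc : prefB.getD h 0 ≥ v
    · rw [if_pos hc, if_neg (by simp only [decide_eq_true_eq]; omega)]
      exact ih ht
    · rw [if_neg hc, if_pos (by simp only [decide_eq_true_eq]; omega)]
      have : t.filter (fun m => prefB.getD m 0 < v) = t := by
        apply List.filter_eq_self.mpr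
        intro m hm
        have := hh m hm
        simp only [decide_eq_true_eq]; omega
      rw [this]

theorem altPopGT_filter (t : Int) (prefB : List Int) :
    ∀ (l : List Nat), l.Pairwise (fun x y => prefB.getD y 0 < prefB.getD x 0) →
      altPopGT t prefB l = l.filter (fun m => prefB.getD m 0 ≤ t) := by
  intro l
  induction l with
  | nil => intro _; simp [altPopGT]
  | cons h tl ih =>
    intro hp
    rw [List.pairwise_cons] at hp
    obtain ⟨hh, ht⟩ := hp
    simp only [altPopGT, List.filter_cons]
    by_cases hc : prefB.getD h 0 > t
    · rw [if_pos hc, if_neg (by simp only [decide_eq_true_eq]; omega)]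
      exact ih ht
    · rw [if_neg hc, if_pos (by simp only [decide_eq_true_eq]; omega)]
      have : tl.filter (fun m => prefB.getD m 0 ≤ t) = tl := by
        apply List.filter_eq_self.mpr
        intro m hm
        have := hh m hm
        simp only [decide_eq_true_eq]; omega
      rw [this]

theorem pairwise_vals (prefB : List Int) (k : Nat) :
    (minsList (fun m => prefB.getD m 0) k).Pairwise
      (fun x y => prefB.getD y 0 < prefB.getD x 0) := by
  have := minsList_pairwise (fun m => prefB.getD m 0) k
  exact this.imp (fun h => h.2)

-- the fold in altBuild computes minsList
theorem altBuild_eq (prefB : List Int) (j0 : Nat) :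
    altBuild prefB j0 = minsList (fun m => prefB.getD m 0) j0 := by
  unfold altBuild
  induction j0 with
  | zero => simp [minsList, altPopGE]
  | succ k ih =>
    rw [List.range_succ, List.foldl_append, ih]
    simp only [List.foldl_cons, List.foldl_nil, minsList]
    rw [altPopGE_filter _ _ _ (pairwise_vals prefB k)]

-- existence of a strict-minimum position below a given one, with no larger value
theorem exists_min_in (p : Nat → Int) (j0 : Nat) :
    ∀ (d j m : Nat), j - m ≤ d → m ≤ j → MinPos p j0 j →
      ∃ ms, m ≤ ms ∧ ms ≤ j ∧ MinPos p j0 ms ∧ p ms ≤ p m := by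
  intro d
  induction d with
  | zero =>
    intro j m hd hm hj
    have : m = j := by omega
    subst this
    exact ⟨m, le_refl _, le_refl _, hj, le_refl _⟩
  | succ d ih =>
    intro j m hd hm hj
    by_cases hme : m = j
    · subst hme; exact ⟨m, le_refl _, le_refl _, hj, le_refl _⟩
    · by_cases hex : ∃ m', m < m' ∧ m' ≤ j ∧ p m' ≤ p m
      · obtain ⟨m', h1, h2, h3⟩ := hex
        obtain ⟨ms, g1, g2, g3, g4⟩ := ih j m' (by omega) h2 hj
        exact ⟨ms, by omega, g2, g3, le_trans g4 h3⟩
      · push Not at hex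
        refine ⟨m, le_refl _, hm, ⟨le_trans hm hj.1, fun m' h1 h2 => ?_⟩, le_refl _⟩
        by_cases hc : m' ≤ j
        · exact hex m' h1 hc
        · calc p m < p j := hex j (by omega) (le_refl _)
            _ < p m' := hj.2 m' (by omega) h2

-- A's inner pop loop, characterised: scan down from j stops exactly at k
theorem popScan (maxSum pAi : Int) (b : List Int) (k : Nat) :
    ∀ (j : Nat), k ≤ j → j ≤ b.length →
      (∀ m, k < m → m ≤ j → pAi + (b.take m).sum > maxSum) →
      (pAi + (b.take k).sum ≤ maxSum ∨ k = 0) →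
      twoStacksPop maxSum b (pAi + (b.take j).sum) j = (pAi + (b.take k).sum, k) := by
  intro j
  induction j with
  | zero =>
    intro hk hj hfail hfit
    have : k = 0 := by omega
    subst this
    rw [twoStacksPop, if_neg (by omega)]
  | succ j ih =>
    intro hk hj hfail hfit
    by_cases hke : k = j + 1
    · subst hke
      rcases hfit with hf | hf
      · rw [twoStacksPop, if_neg (by omega)]
      · omega
    · have hgt : pAi + (b.take (j + 1)).sum > maxSum := hfail (j + 1) (by omega) (le_refl _)
      rw [twoStacksPop, if_pos ⟨hgt, by omega⟩]
      have hstep : pAi + (b.take (j + 1)).sum - b.getD (j + 1 - 1) 0 = pAi + (b.take j).sum := by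
        have := take_succ_sum b j (by omega)
        simp only [Nat.add_sub_cancel]
        omega
      rw [hstep]
      exact ih (by omega) (by omega) (fun m h1 h2 => hfail m h1 (by omega)) hfit

-- ---- main loop correspondence ----

theorem main_eq (maxSum : Int) (a b : List Int) (j0 : Nat) (hj0 : j0 ≤ b.length) :
    ∀ (n i j : Nat) (best : Int), i ≤ a.length → a.length - i ≤ n →
      MinPos (fun m => (altPref b).getD m 0) j0 j →
      twoStacksLoop maxSum a b ((a.take i).sum + (b.take j).sum) i j best
        = altMain maxSum a (altPref b)
            ((minsList (fun m => (altPref b).getD m 0) j0).filter (fun m => m ≤ j))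
            ((a.take i).sum) i best := by
  set P : Nat → Int := fun m => (altPref b).getD m 0 with hP
  have hPval : ∀ m, m ≤ b.length → P m = (b.take m).sum := fun m hm => altPref_getD b m hm
  intro n
  induction n with
  | zero =>
    intro i j best hi hn _
    have hne : ¬ i < a.length := by omega
    rw [twoStacksLoop, altMain, if_neg hne, if_neg hne]
  | succ n ih =>
    intro i j best hi hn hjmin
    have hjb : j ≤ b.length := le_trans hjmin.1 hj0
    rw [twoStacksLoop, altMain]
    by_cases h1 : i < a.length
    · rw [if_pos h1, if_pos h1]
      simp only []
      set s1 := (a.take i).sum + a.getD i 0 with hs1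
      have hs1' : s1 = (a.take (i + 1)).sum := (take_succ_sum a i h1).symm
      set t := maxSum - s1 with ht
      set M := minsList P j0 with hM
      have hMpair : M.Pairwise (fun x y => P y < P x) := by
        have := minsList_pairwise P j0
        exact this.imp (fun h => h.2)
      have hMidx : M.Pairwise (fun x y => y < x) := by
        have := minsList_pairwise P j0
        exact this.imp (fun h => h.1)
      have hstPair : (M.filter (fun m => m ≤ j)).Pairwise (fun x y => P y < P x) :=
        hMpair.filter _
      -- the pop is a filter
      rw [altPopGT_filter t (altPref b) _ hstPair]
      rw [List.filter_filter]
      -- characterise the double filter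
      set st' := M.filter (fun m => decide (P m ≤ t) && decide (m ≤ j)) with hst'
      have hst'mem : ∀ m, m ∈ st' ↔ MinPos P j0 m ∧ P m ≤ t ∧ m ≤ j := by
        intro m
        rw [hst', List.mem_filter]
        simp only [Bool.and_eq_true, decide_eq_true_eq]
        rw [hM, minsList_mem]
      cases hcase : st' with
      | nil =>
        -- no strict-min position ≤ j fits: A pops to 0 and breaks
        have hnofit : ∀ m, m ≤ j → P m > t := by
          intro m hm
          by_contra hle
          push Not at hle
          obtain ⟨ms, g1, g2, g3, g4⟩ := exists_min_in P j0 j j m (by omega) hm hjmin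
          have : ms ∈ st' := (hst'mem ms).mpr ⟨g3, le_trans g4 hle, g2⟩
          rw [hcase] at this; simp at this
        have h0 : P 0 = 0 := by
          rw [hPval 0 (by omega)]; simp
        have hbreak : s1 > maxSum := by
          have := hnofit 0 (by omega)
          rw [h0] at this; omega
        have hpop := popScan maxSum s1 b 0 j (by omega) hjb
          (fun m h1 h2 => by
            have := hnofit m h2
            rw [hPval m (by omega)] at this
            omega)
          (Or.inr rfl)
        have harg : (a.take i).sum + (b.take j).sum + a.getD i 0 = s1 + (b.take j).sum := by
          rw [hs1]; ring
        rw [harg, hpop]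
        simp only [List.take_zero, List.sum_nil, add_zero]
        rw [if_neg (by omega)]
      | cons k rest =>
        -- k is the largest fitting strict-min position; A's pop stops exactly there
        have hkmem : k ∈ st' := by rw [hcase]; simp
        obtain ⟨hkmin, hkfit, hkj⟩ := (hst'mem k).mp hkmem
        have hkb : k ≤ b.length := le_trans hkmin.1 hj0
        -- k is the head of an index-descending list, hence maximal in st'
        have hst'idx : st'.Pairwise (fun x y => y < x) := by
          rw [hst']; exact hMidx.filter _
        have hkmax : ∀ m, m ∈ st' → m ≤ k := by
          intro m hm
          rw [hcase] at hm hst'idx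
          rw [List.pairwise_cons] at hst'idx
          rcases List.mem_cons.mp hm with rfl | hm
          · exact le_refl _
          · exact le_of_lt (hst'idx.1 m hm)
        have hfail : ∀ m, k < m → m ≤ j → s1 + (b.take m).sum > maxSum := by
          intro m h1 h2
          obtain ⟨ms, g1, g2, g3, g4⟩ := exists_min_in P j0 j j m (by omega) h2 hjmin
          have hnot : P ms > t := by
            by_contra hle
            push Not at hle
            have : ms ∈ st' := (hst'mem ms).mpr ⟨g3, hle, g2⟩
            have := hkmax ms this
            omega
          have : P m > t := by
            have := g4; omega
          rw [hPval m (by omega)] at this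
          omega
        have hpop := popScan maxSum s1 b k j hkj hjb hfail
          (Or.inl (by
            have := hkfit
            rw [hPval k hkb] at this
            omega))
        have harg : (a.take i).sum + (b.take j).sum + a.getD i 0 = s1 + (b.take j).sum := by
          rw [hs1]; ring
        rw [harg, hpop]
        rw [if_pos (by
          have := hkfit
          rw [hPval k hkb] at this
          omega)]
        -- re-establish the invariant at j := k
        have hstk : st' = M.filter (fun m => m ≤ k) := by
          rw [hst']
          apply List.filter_congr
          intro m hmem
          have hmmin : MinPos P j0 m := by rw [hM, minsList_mem] at hmem; exact hmem
          rw [Bool.eq_iff_iff]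
          simp only [Bool.and_eq_true, decide_eq_true_eq]
          constructor
          · rintro ⟨hf, hj'⟩
            exact hkmax m ((hst'mem m).mpr ⟨hmmin, hf, hj'⟩)
          · intro hmk
            refine ⟨?_, le_trans hmk hkj⟩
            rcases Nat.lt_or_ge m k with hlt | hge
            · have : P m < P k := hmmin.2 k hlt hkmin.1
              omega
            · have : m = k := by omega
              subst this; exact hkfit
        have hrec := ih (i + 1) k (max best ((i : Int) + 1 + (k : Int))) (by omega) (by omega) hkmin
        rw [← hs1'] at hrec
        rw [← hstk, hcase] at hrec
        exact hrec
    · rw [if_neg h1, if_neg h1]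

-- ===== VERDICT (by name: the statement is the Claim_ definition above) =====
theorem twoStacks_spec : Claim_equal_twoStacks := by
  intro maxSum a b _
  unfold Spec_twoStacks twoStacks twoStacks_alt
  have ht := take_eq_J0 maxSum b b.length 0 (by omega) (by omega)
  rw [List.take_zero, List.sum_nil] at ht
  simp only [Nat.zero_add] at ht
  simp only [ht]
  set j0 := altJ0 maxSum (altPref b) 1 b.length with hj0
  have hle := altJ0_le maxSum (altPref b) (b.length + 1) 1 b.length (by omega) (by omega) (by omega)
  have hj0b : j0 ≤ b.length := hle.2
  have hmin : MinPos (fun m => (altPref b).getD m 0) j0 j0 := ⟨le_refl _, by omega⟩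
  have hm := main_eq maxSum a b j0 hj0b a.length 0 j0 ((j0 : Nat) : Int) (by omega) (by omega) hmin
  rw [List.take_zero, List.sum_nil, zero_add] at hm
  rw [altBuild_eq]
  have hfe : (minsList (fun m => (altPref b).getD m 0) j0).filter (fun m => m ≤ j0)
      = minsList (fun m => (altPref b).getD m 0) j0 := by
    apply List.filter_eq_self.mpr
    intro m hmem
    have := ((minsList_mem _ j0 m).mp hmem).1
    simp only [decide_eq_true_eq]; omega
  rw [hfe] at hm
  simpa using hm
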